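-- pv_equiv track=rewrite | github.com/liampoet/python3-MYSQL_study1 | 21.04.17/giveup_math.py | solution
-- ===== SOURCE A (Python) =====
-- def solution(answers):
--     scores = [0,0,0]
--     result = []
--     pattern1 = [1, 2, 3, 4, 5]
--     pattern2 = [2, 1, 2, 3, 2, 4, 2, 5]
--     pattern3 = [3, 3, 1, 1, 2, 2, 4, 4, 5, 5]
--
--     for i in range(len(answers)):
--         if answers[i] == pattern1[i % len(pattern1)]:
--             scores[0] += 1
--         if answers[i] == pattern2[i % len(pattern2)]:
--             scores[1] += 1
--         if answers[i] == pattern3[i % len(pattern3)]: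
--             scores[2] += 1
--
--     for i in range(len(scores)):
--         if scores[i] == max(scores):
--             result.append(i+1)
--     return result
-- ===== SOURCE B (Python) =====
-- def solution(answers):
--     # Histogram approach: one pass builds counts of (position mod 40, answer) pairs
--     # (40 = lcm of the three pattern cycle lengths 5, 8, 10); each pattern's score
--     # is then read off the histogram in 40 lookups, independent of len(answers).
--     hist = {}
--     for i, a in enumerate(answers):
--         key = (i % 40, a)
--         hist[key] = hist.get(key, 0) + 1
--     patterns = [[1, 2, 3, 4, 5],
--                 [2, 1, 2, 3, 2, 4, 2, 5],
--                 [3, 3, 1, 1, 2, 2, 4, 4, 5, 5]]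
--     scores = [sum(hist.get((r, p[r % len(p)]), 0) for r in range(40)) for p in patterns]
--     m = max(scores)
--     return [k + 1 for k, s in enumerate(scores) if s == m]
-- ===== Notes on version B (the rewrite author's own statement) =====
-- stated objective: alternative
-- what changed: Instead of comparing each answer against the three patterns in one interleaved loop, B builds a histogram of (index mod 40, answer) pairs (40 = lcm of the pattern periods) in one pass with no comparisons, then derives each pattern's score from the histogram with 40 lookups; max is taken once and winners selected by a comprehension.
import Mathlib
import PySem

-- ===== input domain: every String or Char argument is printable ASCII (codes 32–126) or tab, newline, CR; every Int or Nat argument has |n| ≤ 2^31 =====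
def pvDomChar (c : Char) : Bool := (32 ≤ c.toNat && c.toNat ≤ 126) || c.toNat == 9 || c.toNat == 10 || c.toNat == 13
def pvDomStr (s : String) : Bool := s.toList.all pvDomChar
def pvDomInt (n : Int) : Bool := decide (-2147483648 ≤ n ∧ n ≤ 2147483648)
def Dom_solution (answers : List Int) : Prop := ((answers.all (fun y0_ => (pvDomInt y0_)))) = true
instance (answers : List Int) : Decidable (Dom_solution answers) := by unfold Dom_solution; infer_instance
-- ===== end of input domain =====

-- B replaces A's interleaved compare-against-three-patterns loop by a histogram of
-- (index mod 40, answer) pairs (40 = lcm of the pattern periods), from which each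
-- pattern's score is read off in 40 lookups (objective: alternative algorithm).

-- ===== PORT A =====
-- one loop over indices, updating the three scores together; then a selection loop over [0,1,2]
def solution (answers : List Int) : List Int :=
  let pattern1 : List Int := [1, 2, 3, 4, 5]
  let pattern2 : List Int := [2, 1, 2, 3, 2, 4, 2, 5]
  let pattern3 : List Int := [3, 3, 1, 1, 2, 2, 4, 4, 5, 5]
  let scores :=
    (PySem.List.pyRange 0 (answers.length : Int) 1).foldl
      (fun (s : Int × Int × Int) i =>
        (if PySem.List.pyGetD answers i 0 = PySem.List.pyGetD pattern1 (PySem.Int.mod i (pattern1.length : Int)) 0 then s.1 + 1 else s.1,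
         if PySem.List.pyGetD answers i 0 = PySem.List.pyGetD pattern2 (PySem.Int.mod i (pattern2.length : Int)) 0 then s.2.1 + 1 else s.2.1,
         if PySem.List.pyGetD answers i 0 = PySem.List.pyGetD pattern3 (PySem.Int.mod i (pattern3.length : Int)) 0 then s.2.2 + 1 else s.2.2))
      (0, 0, 0)
  let scoresL : List Int := [scores.1, scores.2.1, scores.2.2]
  (PySem.List.pyRange 0 3 1).foldl
    (fun r i =>
      if PySem.List.pyGetD scoresL i 0 = (PySem.List.max? scoresL id).getD 0 then r ++ [i + 1] else r)
    []

-- ===== PORT B =====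
-- one histogram-building pass over (i % 40, a) keys, then 40 lookups per pattern,
-- max once, then one selection comprehension
def solution_alt (answers : List Int) : List Int :=
  let hist : PySem.Dict (Int × Int) Int :=
    (PySem.List.enumerate answers).foldl
      (fun d ia =>
        d.insert (PySem.Int.mod ia.1 40, ia.2) (d.getD (PySem.Int.mod ia.1 40, ia.2) 0 + 1))
      PySem.Dict.empty
  let patterns : List (List Int) :=
    [[1, 2, 3, 4, 5], [2, 1, 2, 3, 2, 4, 2, 5], [3, 3, 1, 1, 2, 2, 4, 4, 5, 5]]
  let scores : List Int :=
    patterns.map (fun p =>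
      ((PySem.List.pyRange 0 40 1).map (fun r =>
          hist.getD (r, PySem.List.pyGetD p (PySem.Int.mod r (p.length : Int)) 0) 0)).sum)
  let m := (PySem.List.max? scores id).getD 0
  (PySem.List.enumerate scores).foldl
    (fun r ks => if ks.2 = m then r ++ [ks.1 + 1] else r) []

-- ===== PRECONDITION & SPEC =====
def Spec_solution (answers : List Int) (out : List Int) : Prop := out = solution_alt answers
instance (answers : List Int) (out : List Int) : Decidable (Spec_solution answers out) := by unfold Spec_solution; infer_instance

-- ===== CLAIM =====
def Claim_equal_solution : Prop := ∀ (answers : List Int), Dom_solution answers → Spec_solution answers (solution answers)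

-- ===== LEMMAS AND PROOFS =====

-- An index loop 'for j in range(k, k+len(xs))' reading ys[j] (ys.drop k = xs) is the fold over enumerate xs k.
lemma foldl_pyRange_eq_foldl_enumerate {β : Type} (f : β → Int → Int → β) (d : Int) (ys : List Int) :
    ∀ (xs : List Int) (k : Nat), ys.drop k = xs → ∀ (init : β),
      (PySem.List.pyRange (k : Int) ((k : Int) + xs.length) 1).foldl
          (fun acc j => f acc j (PySem.List.pyGetD ys j d)) init
        = (PySem.List.enumerate xs (k : Int)).foldl (fun acc ia => f acc ia.1 ia.2) init := by
  intro xs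
  induction xs with
  | nil =>
      intro k _ init
      simp [PySem.List.pyRange_one_eq_nil, PySem.List.enumerate]
  | cons a xs ih =>
      intro k hk init
      have hlt : (k : Int) < (k : Int) + ((a :: xs).length : Int) := by
        simp only [List.length_cons, Nat.cast_add, Nat.cast_one]; omega
      rw [PySem.List.pyRange_one_cons hlt]
      have hget : PySem.List.pyGetD ys (k : Int) d = a := by
        have h' : ys[k]? = some a := by
          have := congrArg List.head? hk
          simpa [List.head?_drop] using this
        simp [PySem.List.pyGetD_natCast, List.getD, h']
      have hdrop : ys.drop (k + 1) = xs := by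
        rw [← List.tail_drop, hk]; rfl
      have := ih (k + 1) hdrop (f init (k : Int) a)
      simp only [List.foldl_cons, hget, PySem.List.enumerate_cons]
      rw [show ((k : Int) + ((a :: xs).length : Int)) = (((k+1 : Nat) : Int) + (xs.length : Int)) by
            simp only [List.length_cons, Nat.cast_add, Nat.cast_one]; ring]
      rw [show ((k : Int) + 1) = ((k + 1 : Nat) : Int) by simp only [Nat.cast_add, Nat.cast_one]]
      exact this

-- 'if c then s+1 else s' as an additive update
lemma ite_succ_eq_add (c : Prop) [Decidable c] (s : Int) :
    (if c then s + 1 else s) = s + (if c then 1 else 0) := by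
  split <;> simp

-- A's triple of interleaved counters is the triple of the three per-pattern 0/1-sums.
lemma foldl_triple_sum (g1 g2 g3 : Int × Int → Int) :
    ∀ (l : List (Int × Int)) (a b c : Int),
      l.foldl (fun s ia => (s.1 + g1 ia, s.2.1 + g2 ia, s.2.2 + g3 ia)) (a, b, c)
        = (a + (l.map g1).sum, b + (l.map g2).sum, c + (l.map g3).sum) := by
  intro l
  induction l with
  | nil => intro a b c; simp
  | cons x l ih =>
      intro a b c
      simp only [List.foldl_cons, List.map_cons, List.sum_cons, ih]
      refine Prod.ext ?_ (Prod.ext ?_ ?_) <;> simp <;> ring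

-- summing the indicator 'x = (r, t r)' over a duplicate-free list containing x.1
lemma sum_ind (x : Int × Int) (t : Int → Int) :
    ∀ (R : List Int), R.Nodup → x.1 ∈ R →
      (R.map (fun r => if x = (r, t r) then (1 : Int) else 0)).sum
        = if x.2 = t x.1 then 1 else 0 := by
  intro R
  induction R with
  | nil => intro _ h; simp at h
  | cons r R ih =>
      intro hnd hmem
      simp only [List.map_cons, List.sum_cons]
      rcases List.mem_cons.mp hmem with h1 | h1
      · have hz : (R.map (fun r => if x = (r, t r) then (1 : Int) else 0)).sum = 0 := by
          apply List.sum_eq_zero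
          intro y hy
          rcases List.mem_map.mp hy with ⟨r', hr', hy'⟩
          have : x ≠ (r', t r') := by
            intro hcontra
            have : x.1 = r' := by rw [hcontra]
            exact (List.nodup_cons.mp hnd).1 (h1 ▸ this ▸ hr')
          simp [this] at hy'; omega
        rw [hz]
        have hiff : (x = (r, t r)) ↔ (x.2 = t x.1) := by
          simp [Prod.ext_iff, h1]
        simp only [hiff]; split <;> ring
      · have hne : x ≠ (r, t r) := by
          intro hcontra
          have : x.1 = r := by rw [hcontra]
          exact (List.nodup_cons.mp hnd).1 (this ▸ h1)
        rw [ih (List.nodup_cons.mp hnd).2 h1]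
        simp [hne]

-- summing per-residue counts over a duplicate-free residue list covering all keys
-- is the 0/1-sum of the match indicator over the key list
lemma sum_count_eq (t : Int → Int) :
    ∀ (l : List (Int × Int)) (R : List Int), R.Nodup → (∀ p ∈ l, p.1 ∈ R) →
      (R.map (fun r => ((l.count (r, t r) : Int)))).sum
        = (l.map (fun p => if p.2 = t p.1 then (1 : Int) else 0)).sum := by
  intro l
  induction l with
  | nil => intro R _ _; simp
  | cons x l ih =>
      intro R hnd hmem
      have hx : x.1 ∈ R := hmem x (List.mem_cons_self)
      have hstep : ∀ r : Int, (((x :: l).count (r, t r) : Int))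
          = ((l.count (r, t r) : Int)) + (if x = (r, t r) then (1 : Int) else 0) := by
        intro r
        rw [List.count_cons]
        by_cases h : x = (r, t r)
        · simp [h]
        · simp [h]
      simp only [hstep]
      rw [show (fun r => ((l.count (r, t r) : Int)) + (if x = (r, t r) then (1 : Int) else 0))
            = (fun r => ((fun r => ((l.count (r, t r) : Int))) r + (fun r => (if x = (r, t r) then (1 : Int) else 0)) r)) from rfl]
      rw [PySem.List.sum_map_add_int]
      rw [ih R hnd (fun p hp => hmem p (List.mem_cons_of_mem _ hp))]
      rw [sum_ind x t R hnd hx]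
      simp only [List.map_cons, List.sum_cons]
      ring

-- residues taken mod 40 land in range(40)
lemma mod40_mem_range (i : Int) : PySem.Int.mod i 40 ∈ PySem.List.pyRange 0 40 1 := by
  rw [PySem.List.mem_pyRange_one, PySem.Int.mod_eq_emod_of_pos (by norm_num)]
  omega

-- reducing mod 40 first does not change the residue mod a divisor of 40
lemma mod_mod_40 (i L : Int) (hL : 0 < L) (hdvd : L ∣ 40) :
    PySem.Int.mod (PySem.Int.mod i 40) L = PySem.Int.mod i L := by
  rw [PySem.Int.mod_eq_emod_of_pos hL, PySem.Int.mod_eq_emod_of_pos hL,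
      PySem.Int.mod_eq_emod_of_pos (by norm_num : (0:Int) < 40)]
  exact Int.emod_emod_of_dvd i hdvd

-- B's 40-lookup score for a pattern equals the per-answer 0/1 match sum
lemma score_pattern (answers p : List Int) (hL : 0 < (p.length : Int))
    (hdvd : (p.length : Int) ∣ 40) :
    ((PySem.List.pyRange 0 40 1).map (fun r =>
        (PySem.Dict.counter
            ((PySem.List.enumerate answers).map (fun ia => (PySem.Int.mod ia.1 40, ia.2)))).getD
          (r, PySem.List.pyGetD p (PySem.Int.mod r (p.length : Int)) 0) 0)).sum
      = ((PySem.List.enumerate answers).map (fun ia =>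
          if ia.2 = PySem.List.pyGetD p (PySem.Int.mod ia.1 (p.length : Int)) 0 then (1 : Int) else 0)).sum := by
  simp only [PySem.Dict.getD_counter]
  rw [sum_count_eq (fun r => PySem.List.pyGetD p (PySem.Int.mod r (p.length : Int)) 0)
        ((PySem.List.enumerate answers).map (fun ia => (PySem.Int.mod ia.1 40, ia.2)))
        (PySem.List.pyRange 0 40 1) (PySem.List.nodup_pyRange_one 0 40)
        (by
          intro q hq
          rcases List.mem_map.mp hq with ⟨ia, _, hq'⟩
          rw [← hq']
          exact mod40_mem_range ia.1)]
  rw [List.map_map]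
  congr 1
  apply List.map_congr_left
  intro ia _
  simp only [Function.comp]
  rw [mod_mod_40 ia.1 (p.length : Int) hL hdvd]

-- the histogram loop over enumerate builds the counter of the key list
lemma hist_eq_counter (answers : List Int) :
    (PySem.List.enumerate answers).foldl
      (fun (d : PySem.Dict (Int × Int) Int) ia =>
        d.insert (PySem.Int.mod ia.1 40, ia.2) (d.getD (PySem.Int.mod ia.1 40, ia.2) 0 + 1))
      PySem.Dict.empty
    = PySem.Dict.counter
        ((PySem.List.enumerate answers).map (fun ia => (PySem.Int.mod ia.1 40, ia.2))) := by
  rw [← PySem.Dict.foldl_insert_getD_add_one_eq_counter, List.foldl_map]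

-- the two 3-element selection loops agree
lemma select_eq (c1 c2 c3 : Int) :
    (PySem.List.pyRange 0 3 1).foldl
        (fun r i =>
          if PySem.List.pyGetD [c1, c2, c3] i 0 = (PySem.List.max? [c1, c2, c3] id).getD 0
          then r ++ [i + 1] else r) []
      = (PySem.List.enumerate [c1, c2, c3]).foldl
          (fun r is =>
            if is.2 = (PySem.List.max? [c1, c2, c3] id).getD 0
            then r ++ [is.1 + 1] else r) [] := by
  have h3 : PySem.List.pyRange 0 3 1 = [0, 1, 2] := by decide
  simp [h3, PySem.List.enumerate, PySem.List.pyGetD, PySem.List.pyGet?, PySem.List.pyIdx?]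

theorem solution_equal (answers : List Int) : solution answers = solution_alt answers := by
  simp only [solution, solution_alt, List.map_cons, List.map_nil]
  rw [hist_eq_counter]
  -- A's index loop as a fold over enumerate
  have h0 : answers.drop 0 = answers := List.drop_zero
  have hA := foldl_pyRange_eq_foldl_enumerate
      (f := fun (s : Int × Int × Int) (j a : Int) =>
        (if a = PySem.List.pyGetD [1, 2, 3, 4, 5] (PySem.Int.mod j (([1, 2, 3, 4, 5] : List Int).length : Int)) 0 then s.1 + 1 else s.1,
         if a = PySem.List.pyGetD [2, 1, 2, 3, 2, 4, 2, 5] (PySem.Int.mod j (([2, 1, 2, 3, 2, 4, 2, 5] : List Int).length : Int)) 0 then s.2.1 + 1 else s.2.1,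
         if a = PySem.List.pyGetD [3, 3, 1, 1, 2, 2, 4, 4, 5, 5] (PySem.Int.mod j (([3, 3, 1, 1, 2, 2, 4, 4, 5, 5] : List Int).length : Int)) 0 then s.2.2 + 1 else s.2.2))
      0 answers answers 0 h0 ((0 : Int), (0 : Int), (0 : Int))
  simp only [Nat.cast_zero, zero_add] at hA
  rw [hA]
  rw [show (fun (acc : Int × Int × Int) (ia : Int × Int) =>
        (if ia.2 = PySem.List.pyGetD [1, 2, 3, 4, 5] (PySem.Int.mod ia.1 (([1, 2, 3, 4, 5] : List Int).length : Int)) 0 then acc.1 + 1 else acc.1,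
         if ia.2 = PySem.List.pyGetD [2, 1, 2, 3, 2, 4, 2, 5] (PySem.Int.mod ia.1 (([2, 1, 2, 3, 2, 4, 2, 5] : List Int).length : Int)) 0 then acc.2.1 + 1 else acc.2.1,
         if ia.2 = PySem.List.pyGetD [3, 3, 1, 1, 2, 2, 4, 4, 5, 5] (PySem.Int.mod ia.1 (([3, 3, 1, 1, 2, 2, 4, 4, 5, 5] : List Int).length : Int)) 0 then acc.2.2 + 1 else acc.2.2))
      = (fun (acc : Int × Int × Int) (ia : Int × Int) =>
        (acc.1 + (if ia.2 = PySem.List.pyGetD [1, 2, 3, 4, 5] (PySem.Int.mod ia.1 (([1, 2, 3, 4, 5] : List Int).length : Int)) 0 then 1 else 0),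
         acc.2.1 + (if ia.2 = PySem.List.pyGetD [2, 1, 2, 3, 2, 4, 2, 5] (PySem.Int.mod ia.1 (([2, 1, 2, 3, 2, 4, 2, 5] : List Int).length : Int)) 0 then 1 else 0),
         acc.2.2 + (if ia.2 = PySem.List.pyGetD [3, 3, 1, 1, 2, 2, 4, 4, 5, 5] (PySem.Int.mod ia.1 (([3, 3, 1, 1, 2, 2, 4, 4, 5, 5] : List Int).length : Int)) 0 then 1 else 0)))
      from by funext acc ia; simp [ite_succ_eq_add]]
  rw [foldl_triple_sum]
  simp only [zero_add]
  -- B's histogram scores equal the per-answer 0/1 sums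
  simp only [score_pattern answers [1, 2, 3, 4, 5] (by norm_num) (by norm_num),
      score_pattern answers [2, 1, 2, 3, 2, 4, 2, 5] (by norm_num) (by norm_num),
      score_pattern answers [3, 3, 1, 1, 2, 2, 4, 4, 5, 5] (by norm_num) (by norm_num)]
  exact select_eq _ _ _

-- ===== VERDICT =====
theorem solution_spec : Claim_equal_solution := by
  intro answers _
  unfold Spec_solution
  exact solution_equal answers
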